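-- pv_equiv track=rewrite | github.com/timqi/WenZi | src/wenzi/scripting/sources/__init__.py | _word_initials
-- ===== SOURCE A (Python) =====
-- def _word_initials(text: str) -> str:
--     """Extract lowercase initials from words and CamelCase boundaries.
--
--     "System Configuration" -> "sc"
--     "DragonDrop" -> "dd"
--     "Visual Studio Code" -> "vsc"
--     """
--     initials: list[str] = []
--     prev_lower = False
--     for i, ch in enumerate(text):
--         if ch in (" ", "-", "_"):
--             prev_lower = False
--             continue
--         if i == 0 or text[i - 1] in (" ", "-", "_"):
--             # Start of a word
--             initials.append(ch.lower())
--             prev_lower = ch.islower()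
--         elif ch.isupper() and prev_lower:
--             # CamelCase boundary
--             initials.append(ch.lower())
--             prev_lower = False
--         else:
--             prev_lower = ch.islower()
--     return "".join(initials)
-- ===== SOURCE B (Python) =====
-- def _word_initials(text: str) -> str:
--     # Two-phase: tokenize on ' ', '-', '_', then scan each word locally.
--     words = []
--     cur = ""
--     for ch in text:
--         if ch in " -_":
--             if cur:
--                 words.append(cur)
--                 cur = ""
--         else:
--             cur += ch
--     if cur:
--         words.append(cur)
--     out = []
--     for w in words:
--         out.append(w[0].lower())
--         prev = w[0]
--         for ch in w[1:]:
--             if ch.isupper() and prev.islower():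
--                 out.append(ch.lower())
--             prev = ch
--     return "".join(out)
-- ===== Notes on version B (the rewrite author's own statement) =====
-- stated objective: alternative
-- what changed: Replaces A's single stateful pass (enumerate with a prev_lower flag and lookback at the previous index) by an explicit two-phase algorithm: first tokenize the text into words on the separator characters, then scan each word locally, emitting its first character and each upper-after-lower CamelCase boundary.
import Mathlib
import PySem

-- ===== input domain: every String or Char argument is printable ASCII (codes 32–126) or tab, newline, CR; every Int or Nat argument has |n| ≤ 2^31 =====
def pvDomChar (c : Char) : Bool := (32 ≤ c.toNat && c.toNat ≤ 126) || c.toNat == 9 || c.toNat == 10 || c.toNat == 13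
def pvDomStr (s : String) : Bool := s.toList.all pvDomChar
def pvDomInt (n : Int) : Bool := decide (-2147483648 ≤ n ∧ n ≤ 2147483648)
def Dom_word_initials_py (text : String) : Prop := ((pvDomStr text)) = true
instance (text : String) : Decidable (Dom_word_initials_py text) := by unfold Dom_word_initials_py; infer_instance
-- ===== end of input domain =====

-- B re-implements the single stateful pass as an explicit two-phase tokenize-then-scan (same cost, clearer decomposition); return values agree everywhere.

-- ===== PORT A =====
def word_initials_py (text : String) : String :=
  String.mk ((PySem.List.enumerate text.toList 0).foldl
    (fun (st : List Char × Bool) (p : Int × Char) =>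
      if p.2 == ' ' || p.2 == '-' || p.2 == '_' then (st.1, false)
      else if p.1 == 0 || ((PySem.List.pyGet? text.toList (p.1 - 1)).elim false
            (fun c => c == ' ' || c == '-' || c == '_')) then
        (st.1 ++ [PySem.Chars.lowerChar p.2], PySem.Chars.islower p.2)
      else if PySem.Chars.isupper p.2 && st.2 then
        (st.1 ++ [PySem.Chars.lowerChar p.2], false)
      else (st.1, PySem.Chars.islower p.2))
    (([] : List Char), false)).1

-- ===== PORT B =====
-- phase 1: tokenize on ' ', '-', '_' (mirrors Source B's first loop; cur accumulated left-to-right)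
def pvSplitWords : List Char → List Char → List (List Char)
  | [], cur => if cur.isEmpty then [] else [cur]
  | ch :: rest, cur =>
    if ch == ' ' || ch == '-' || ch == '_' then
      if cur.isEmpty then pvSplitWords rest [] else cur :: pvSplitWords rest []
    else pvSplitWords rest (cur ++ [ch])

-- phase 2, inner loop: 'prev = w[0]; for ch in w[1:]: …'
def pvScanTail (prev : Char) : List Char → List Char
  | [] => []
  | ch :: rest =>
    (if PySem.Chars.isupper ch && PySem.Chars.islower prev then [PySem.Chars.lowerChar ch]
     else []) ++ pvScanTail ch rest

def pvScanWord : List Char → List Char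
  | [] => []
  | c :: rest => PySem.Chars.lowerChar c :: pvScanTail c rest

def word_initials_py_alt (text : String) : String :=
  String.mk ((pvSplitWords text.toList []).foldl (fun acc w => acc ++ pvScanWord w) [])

-- ===== PRECONDITION & SPEC =====
def Spec_word_initials_py (text : String) (out : String) : Prop := out = word_initials_py_alt text
instance (text : String) (out : String) : Decidable (Spec_word_initials_py text out) := by unfold Spec_word_initials_py; infer_instance

-- ===== CLAIM (what is proved, stated in full; the proofs are below) =====
def Claim_equal_word_initials_py : Prop := ∀ (text : String), Dom_word_initials_py text → Spec_word_initials_py text (word_initials_py text)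

-- ===== LEMMAS AND PROOFS =====

-- A's loop re-expressed as structural recursion carrying the previous character
def pvAux : List Char → Option Char → Bool → List Char
  | [], _, _ => []
  | ch :: rest, prev, pl =>
    if ch == ' ' || ch == '-' || ch == '_' then pvAux rest (some ch) false
    else if (match prev with
             | none => true
             | some c => c == ' ' || c == '-' || c == '_') then
      PySem.Chars.lowerChar ch :: pvAux rest (some ch) (PySem.Chars.islower ch)
    else if PySem.Chars.isupper ch && pl then
      PySem.Chars.lowerChar ch :: pvAux rest (some ch) false
    else pvAux rest (some ch) (PySem.Chars.islower ch)

theorem pv_isupper_not_islower (c : Char) (h : PySem.Chars.isupper c = true) :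
    PySem.Chars.islower c = false := by
  simp only [PySem.Chars.isupper, Bool.and_eq_true, decide_eq_true_eq] at h
  simp only [PySem.Chars.islower, Bool.and_eq_false_iff, decide_eq_false_iff_not]
  left
  intro h2
  have h3 := h.2
  simp only [Char.le_def, UInt32.le_iff_toNat_le] at h2 h3
  have e1 : ('a' : Char).val.toNat = 97 := rfl
  have e2 : ('Z' : Char).val.toNat = 90 := rfl
  omega

theorem pv_prev (pre tail : List Char) :
    (((pre.length : Int)) == 0 || ((PySem.List.pyGet? (pre ++ tail) ((pre.length : Int) - 1)).elim false
        (fun c => c == ' ' || c == '-' || c == '_')))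
    = (match pre.getLast? with
       | none => true
       | some c => c == ' ' || c == '-' || c == '_') := by
  match pre with
  | [] => simp [PySem.List.pyGet?]
  | p :: pre' =>
    have h1 : ((((p :: pre').length : Int)) == 0) = false := by
      simp
      omega
    have h2 : ((p :: pre').length : Int) - 1 = (((p :: pre').length - 1 : Nat) : Int) := by
      simp
    rw [h1, h2, Bool.false_or, PySem.List.pyGet?_natCast]
    rw [List.getElem?_append_left (by simp)]
    rw [← List.getLast?_eq_getElem?]
    rcases h : (p :: pre').getLast? with _ | c
    · simp at h
    · simp

theorem pv_A_loop (cs pre : List Char) (acc : List Char) (pl : Bool) :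
    ((PySem.List.enumerate cs ((pre.length : Int))).foldl
      (fun (st : List Char × Bool) (p : Int × Char) =>
        if p.2 == ' ' || p.2 == '-' || p.2 == '_' then (st.1, false)
        else if p.1 == 0 || ((PySem.List.pyGet? (pre ++ cs) (p.1 - 1)).elim false
              (fun c => c == ' ' || c == '-' || c == '_')) then
          (st.1 ++ [PySem.Chars.lowerChar p.2], PySem.Chars.islower p.2)
        else if PySem.Chars.isupper p.2 && st.2 then
          (st.1 ++ [PySem.Chars.lowerChar p.2], false)
        else (st.1, PySem.Chars.islower p.2))
      (acc, pl)).1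
    = acc ++ pvAux cs pre.getLast? pl := by
  induction cs generalizing pre acc pl with
  | nil => simp [PySem.List.enumerate_nil, pvAux]
  | cons ch cs' ih =>
    rw [PySem.List.enumerate_cons, List.foldl_cons]
    have hcast : (pre.length : Int) + 1 = ((pre ++ [ch]).length : Int) := by
      simp
    have hfull : pre ++ ch :: cs' = (pre ++ [ch]) ++ cs' := by
      simp
    have hlast : (pre ++ [ch]).getLast? = some ch := by
      simp
    by_cases hsep : (ch == ' ' || ch == '-' || ch == '_') = true
    · simp only [hsep, if_true]
      rw [hcast, hfull]
      rw [ih (pre ++ [ch]) acc false, hlast]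
      rw [show pvAux (ch :: cs') pre.getLast? pl
            = pvAux cs' (some ch) false by rw [pvAux.eq_def]; simp [hsep]]
    · have hsep' : (ch == ' ' || ch == '-' || ch == '_') = false := by simpa using hsep
      simp only [hsep', Bool.false_eq_true, if_false]
      rw [show ((pre.length : Int) == 0 || ((PySem.List.pyGet? (pre ++ ch :: cs') ((pre.length : Int) - 1)).elim false
              (fun c => c == ' ' || c == '-' || c == '_')))
            = (match pre.getLast? with
               | none => true
               | some c => c == ' ' || c == '-' || c == '_') from pv_prev pre (ch :: cs')]
      by_cases hw : (match pre.getLast? with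
               | none => true
               | some c => c == ' ' || c == '-' || c == '_') = true
      · simp only [hw, if_true]
        rw [hcast, hfull, ih (pre ++ [ch]) _ _, hlast]
        rw [show pvAux (ch :: cs') pre.getLast? pl
              = PySem.Chars.lowerChar ch :: pvAux cs' (some ch) (PySem.Chars.islower ch) by
            rw [pvAux.eq_def]; simp [hsep', hw]]
        simp
      · have hw' : (match pre.getLast? with
               | none => true
               | some c => c == ' ' || c == '-' || c == '_') = false := by
          simpa using hw
        simp only [hw', Bool.false_eq_true, if_false]
        by_cases hcam : (PySem.Chars.isupper ch && pl) = true
        · simp only [hcam, if_true]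
          rw [hcast, hfull, ih (pre ++ [ch]) _ _, hlast]
          rw [show pvAux (ch :: cs') pre.getLast? pl
                = PySem.Chars.lowerChar ch :: pvAux cs' (some ch) false by
              rw [pvAux.eq_def]; simp [hsep', hw', hcam]]
          simp
        · have hcam' : (PySem.Chars.isupper ch && pl) = false := by simpa using hcam
          simp only [hcam', Bool.false_eq_true, if_false]
          rw [hcast, hfull, ih (pre ++ [ch]) _ _, hlast]
          rw [show pvAux (ch :: cs') pre.getLast? pl
                = pvAux cs' (some ch) (PySem.Chars.islower ch) by
              rw [pvAux.eq_def]; simp [hsep', hw', hcam']]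

theorem pv_scanTail_append (xs : List Char) (p ch : Char) :
    pvScanTail p (xs ++ [ch])
      = pvScanTail p xs ++ pvScanTail ((p :: xs).getLast (List.cons_ne_nil _ _)) [ch] := by
  induction xs generalizing p with
  | nil => simp [pvScanTail]
  | cons x xs ih =>
    simp only [List.cons_append, pvScanTail, ih x, List.getLast_cons (List.cons_ne_nil _ _)]
    simp [List.append_assoc]

theorem pv_scanWord_append (cur : List Char) (l ch : Char) (h : cur.getLast? = some l) :
    pvScanWord (cur ++ [ch]) = pvScanWord cur
      ++ (if PySem.Chars.isupper ch && PySem.Chars.islower l then [PySem.Chars.lowerChar ch]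
          else []) := by
  match cur with
  | [] => simp at h
  | c :: cs' =>
    have hl : (c :: cs').getLast (List.cons_ne_nil _ _) = l := by
      have h2 := List.getLast?_eq_some_getLast (l := c :: cs') (List.cons_ne_nil _ _)
      rw [h2] at h; exact Option.some.inj h
    simp only [List.cons_append, pvScanWord, pv_scanTail_append, hl, pvScanTail]
    simp

theorem pv_main (cs : List Char) :
    ((pvSplitWords cs []).flatMap pvScanWord = pvAux cs none false
      ∧ ∀ s : Char, (s == ' ' || s == '-' || s == '_') = true →
          (pvSplitWords cs []).flatMap pvScanWord = pvAux cs (some s) false)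
    ∧ ∀ (cur : List Char) (l : Char), cur.getLast? = some l →
        (l == ' ' || l == '-' || l == '_') = false →
        (pvSplitWords cs cur).flatMap pvScanWord
          = pvScanWord cur ++ pvAux cs (some l) (PySem.Chars.islower l) := by
  induction cs with
  | nil =>
    refine ⟨⟨by simp [pvSplitWords, pvAux], fun s _ => by simp [pvSplitWords, pvAux]⟩, ?_⟩
    intro cur l hl _
    have hne : cur ≠ [] := by rintro rfl; simp at hl
    simp [pvSplitWords, List.isEmpty_eq_false_iff.mpr hne, pvAux]
  | cons ch rest ih =>
    by_cases hsep : (ch == ' ' || ch == '-' || ch == '_') = true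
    · refine ⟨⟨?_, fun s hs => ?_⟩, ?_⟩
      · simp only [pvSplitWords, hsep, if_true, List.isEmpty_nil, pvAux]
        exact ih.1.2 ch hsep
      · simp only [pvSplitWords, hsep, if_true, List.isEmpty_nil, pvAux]
        exact ih.1.2 ch hsep
      · intro cur l hl hns
        have hne : cur ≠ [] := by rintro rfl; simp at hl
        simp only [pvSplitWords, hsep, if_true, List.isEmpty_eq_false_iff.mpr hne,
          Bool.false_eq_true, if_false, List.flatMap_cons, pvAux]
        rw [ih.1.2 ch hsep]
    · have hsep' : (ch == ' ' || ch == '-' || ch == '_') = false := by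
        simpa using hsep
      have hstep1 : ∀ op, (match op with
             | none => true
             | some c => c == ' ' || c == '-' || c == '_') = true →
          pvAux (ch :: rest) op false
            = PySem.Chars.lowerChar ch :: pvAux rest (some ch) (PySem.Chars.islower ch) := by
        intro op hop
        simp [pvAux, hsep', hop]
      have hP : ∀ op, (match op with
             | none => true
             | some c => c == ' ' || c == '-' || c == '_') = true →
          (pvSplitWords (ch :: rest) []).flatMap pvScanWord = pvAux (ch :: rest) op false := by
        intro op hop
        rw [hstep1 op hop]
        simp only [pvSplitWords, hsep', Bool.false_eq_true, if_false, List.nil_append]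
        rw [ih.2 [ch] ch (by simp) hsep']
        simp [pvScanWord, pvScanTail]
      refine ⟨⟨hP none rfl, fun s hs => hP (some s) hs⟩, ?_⟩
      intro cur l hl hns
      simp only [pvSplitWords, hsep', Bool.false_eq_true, if_false]
      rw [ih.2 (cur ++ [ch]) ch (by simp) hsep']
      rw [pv_scanWord_append cur l ch hl]
      have : pvAux (ch :: rest) (some l) (PySem.Chars.islower l)
          = (if PySem.Chars.isupper ch && PySem.Chars.islower l then [PySem.Chars.lowerChar ch]
             else []) ++ pvAux rest (some ch) (PySem.Chars.islower ch) := by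
        simp only [pvAux, hsep', Bool.false_eq_true, if_false, hns]
        by_cases hc : (PySem.Chars.isupper ch && PySem.Chars.islower l) = true
        · have : PySem.Chars.islower ch = false :=
            pv_isupper_not_islower ch (Bool.and_elim_left hc)
          simp [hc, this]
        · simp [hc]
      rw [this, List.append_assoc]

theorem word_initials_py_spec : Claim_equal_word_initials_py := by
  intro text _
  unfold Spec_word_initials_py
  have hA := pv_A_loop text.toList [] [] false
  simp only [List.nil_append, List.length_nil, Nat.cast_zero, List.getLast?_nil] at hA
  have hB : (pvSplitWords text.toList []).foldl (fun acc w => acc ++ pvScanWord w) []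
      = pvAux text.toList none false := by
    rw [PySem.List.foldl_append_eq_flatMap]
    simpa using (pv_main text.toList).1.1
  exact congrArg String.mk (hA.trans hB.symm)
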